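-- pv_equiv track=rewrite | github.com/785Coder/science-data-homework | rec.py | tokenize_name
-- ===== SOURCE A (Python) =====
-- def tokenize_name(name):
--     s = name.lower()
--     buf = []
--     cur = []
--     for ch in s:
--         if ch.isalnum() or ord(ch) > 127:
--             cur.append(ch)
--         else:
--             if cur:
--                 buf.append("".join(cur))
--                 cur = []
--     if cur:
--         buf.append("".join(cur))
--     return buf
-- ===== SOURCE B (Python) =====
-- def tokenize_name(name):
--     masked = "".join(
--         ch if (ch.isalnum() or ord(ch) > 127) else " " for ch in name.lower()
--     )
--     return masked.split()
-- ===== Notes on version B (the rewrite author's own statement) =====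
-- stated objective: simpler
-- what changed: Replaced the manual buffer/flush accumulator loop by two staged passes: mask every non-token character to a space, then let str.split() extract the words.
import Mathlib
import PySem

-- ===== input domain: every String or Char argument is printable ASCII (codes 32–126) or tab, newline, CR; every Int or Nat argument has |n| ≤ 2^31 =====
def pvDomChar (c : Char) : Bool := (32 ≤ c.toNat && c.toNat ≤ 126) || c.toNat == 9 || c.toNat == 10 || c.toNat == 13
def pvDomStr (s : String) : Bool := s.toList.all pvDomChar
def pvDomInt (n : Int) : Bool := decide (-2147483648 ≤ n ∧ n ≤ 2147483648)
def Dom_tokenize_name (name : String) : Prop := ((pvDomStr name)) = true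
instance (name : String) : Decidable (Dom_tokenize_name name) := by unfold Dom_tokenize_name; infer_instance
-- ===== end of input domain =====

-- B replaces A's manual buffer/flush accumulator by two staged passes — mask every
-- non-token character to a space, then str.split() extracts the words; simpler, same cost.

-- ===== PORT A =====
-- the token predicate: ch.isalnum() or ord(ch) > 127
def pvTok (c : Char) : Bool := PySem.Chars.isalnum c || decide (c.toNat > 127)

-- one iteration of A's for-loop over (buf, cur)
def pvStep (st : List String × List Char) (ch : Char) : List String × List Char :=
  if pvTok ch then (st.1, st.2 ++ [ch])
  else if st.2 ≠ [] then (st.1 ++ [String.ofList st.2], []) else st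

def tokenize_name (name : String) : List String :=
  let s := (PySem.Str.lower name).toList
  let r := s.foldl pvStep ([], [])
  if r.2 ≠ [] then r.1 ++ [String.ofList r.2] else r.1

-- ===== PORT B =====
-- masked = "".join(ch if tok(ch) else " " for ch in name.lower()); return masked.split()
def tokenize_name_alt (name : String) : List String :=
  let masked :=
    String.ofList ((PySem.Str.lower name).toList.map (fun ch => if pvTok ch then ch else ' '))
  PySem.Str.split₀ masked

-- ===== PRECONDITION & SPEC =====
def Spec_tokenize_name (name : String) (out : List String) : Prop := out = tokenize_name_alt name
instance (name : String) (out : List String) : Decidable (Spec_tokenize_name name out) := by unfold Spec_tokenize_name; infer_instance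

-- ===== CLAIM (what is proved, stated in full; the proofs are below) =====
def Claim_equal_tokenize_name : Prop := ∀ (name : String), Dom_tokenize_name name → Spec_tokenize_name name (tokenize_name name)

-- ===== LEMMAS AND PROOFS =====

-- the maximal token runs of a character list (proof-side characterisation both ports reach)
def pvRuns : List Char → List (List Char)
  | [] => []
  | c :: cs =>
      if pvTok c then (c :: cs.takeWhile pvTok) :: pvRuns (cs.dropWhile pvTok)
      else pvRuns cs
  termination_by cs => cs.length
  decreasing_by
  · have := List.Sublist.length_le (List.dropWhile_sublist (l := cs) pvTok)
    simp; omega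
  · simp

-- A's loop computes buf ++ the runs (with the partial run cur in front)
theorem pvLoop (cs : List Char) : ∀ (buf : List String) (cur : List Char),
    (let r := cs.foldl pvStep (buf, cur)
     if r.2 ≠ [] then r.1 ++ [String.ofList r.2] else r.1) =
      buf ++ (if cur = [] then (pvRuns cs).map String.ofList
              else String.ofList (cur ++ cs.takeWhile pvTok) ::
                     (pvRuns (cs.dropWhile pvTok)).map String.ofList) := by
  induction cs with
  | nil =>
      intro buf cur
      by_cases h : cur = [] <;> simp [h, pvRuns]
  | cons c cs ih =>
      intro buf cur
      simp only [List.foldl_cons]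
      by_cases hc : pvTok c
      · rw [show pvStep (buf, cur) c = (buf, cur ++ [c]) from by simp [pvStep, hc]]
        rw [ih buf (cur ++ [c])]
        by_cases h : cur = [] <;> simp [h, pvRuns, hc]
      · by_cases h : cur = []
        · rw [show pvStep (buf, cur) c = (buf, cur) from by simp [pvStep, hc, h]]
          rw [ih buf cur]
          simp [h, pvRuns, hc]
        · rw [show pvStep (buf, cur) c = (buf ++ [String.ofList cur], []) from by simp [pvStep, hc, h]]
          rw [ih (buf ++ [String.ofList cur]) []]
          simp [h, pvRuns, hc]

-- a domain character masked by B is whitespace exactly when it is not a token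
theorem pvMaskSpace (c : Char) (hd : pvDomChar c = true) :
    PySem.Chars.isspace (if pvTok c then c else ' ') = !pvTok c := by
  by_cases hc : pvTok c
  · simp only [hc, if_pos, Bool.not_true]
    rw [Bool.eq_false_iff]
    intro hsp
    simp only [pvDomChar, pvTok, PySem.Chars.isalnum, PySem.Chars.isalpha, PySem.Chars.isdigit,
      PySem.Chars.isupper, PySem.Chars.islower, PySem.Chars.isspace, Char.le_def,
      UInt32.le_iff_toNat_le, Char.toNat] at hd hc hsp
    have h1 : ('0':Char).val.toNat = 48 := by decide
    have h2 : ('9':Char).val.toNat = 57 := by decide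
    have h3 : ('A':Char).val.toNat = 65 := by decide
    have h4 : ('Z':Char).val.toNat = 90 := by decide
    have h5 : ('a':Char).val.toNat = 97 := by decide
    have h6 : ('z':Char).val.toNat = 122 := by decide
    simp only [h1, h2, h3, h4, h5, h6, Bool.or_eq_true, Bool.and_eq_true, decide_eq_true_eq,
      beq_iff_eq] at hd hc hsp
    omega
  · simp [hc, PySem.Chars.isspace]

-- split₀.go over the masked list produces the runs (generalised over the go state)
theorem pvGoRuns (cs : List Char) : (∀ c ∈ cs, pvDomChar c = true) →
    ∀ (cur : List Char) (acc : List (List Char)),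
    PySem.Chars.split₀.go (cs.map (fun ch => if pvTok ch then ch else ' ')) cur acc =
      acc.reverse ++ (if cur = [] then pvRuns cs
                      else (cur.reverse ++ cs.takeWhile pvTok) :: pvRuns (cs.dropWhile pvTok)) := by
  induction cs with
  | nil =>
      intro _ cur acc
      by_cases h : cur = [] <;> simp [h, pvRuns, PySem.Chars.split₀.go]
  | cons c cs ih =>
      intro hdom cur acc
      have hc : pvDomChar c = true := hdom c (List.mem_cons_self ..)
      have hcs : ∀ x ∈ cs, pvDomChar x = true := fun x hx => hdom x (List.mem_cons_of_mem _ hx)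
      simp only [List.map_cons]
      by_cases ht : pvTok c
      · have hmc : (if pvTok c then c else ' ') = c := by rw [if_pos ht]
        have hsp : PySem.Chars.isspace c = false := by
          have := pvMaskSpace c hc; rw [hmc] at this; rw [this, ht]; rfl
        rw [hmc]
        rw [show PySem.Chars.split₀.go (c :: cs.map (fun ch => if pvTok ch then ch else ' ')) cur acc
            = PySem.Chars.split₀.go (cs.map (fun ch => if pvTok ch then ch else ' ')) (c :: cur) acc
          from by simp [PySem.Chars.split₀.go, hsp]]
        rw [ih hcs (c :: cur) acc]
        by_cases h : cur = [] <;> simp [h, pvRuns, ht]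
      · have hmc : (if pvTok c then c else ' ') = ' ' := by rw [if_neg ht]
        have hsp : PySem.Chars.isspace ' ' = true := by decide
        rw [hmc]
        by_cases h : cur = []
        · rw [show PySem.Chars.split₀.go (' ' :: cs.map (fun ch => if pvTok ch then ch else ' ')) cur acc
              = PySem.Chars.split₀.go (cs.map (fun ch => if pvTok ch then ch else ' ')) [] acc
            from by simp [PySem.Chars.split₀.go, hsp, h]]
          rw [ih hcs [] acc]
          simp [h, pvRuns, ht]
        · rw [show PySem.Chars.split₀.go (' ' :: cs.map (fun ch => if pvTok ch then ch else ' ')) cur acc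
              = PySem.Chars.split₀.go (cs.map (fun ch => if pvTok ch then ch else ' ')) [] (cur.reverse :: acc)
            from by simp [PySem.Chars.split₀.go, hsp, h]]
          rw [ih hcs [] (cur.reverse :: acc)]
          simp [h, pvRuns, ht]

-- Dom is preserved by lowerChar, hence by name.lower()
theorem pvLowerChDom (c : Char) (hd : pvDomChar c = true) :
    pvDomChar (PySem.Chars.lowerChar c) = true := by
  simp only [PySem.Chars.lowerChar, PySem.Chars.isupper]
  by_cases h : ('A' ≤ c ∧ c ≤ 'Z')
  · rw [if_pos (by simp [h.1, h.2])]
    have hb : 65 ≤ c.toNat ∧ c.toNat ≤ 90 := by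
      obtain ⟨h1, h2⟩ := h
      have hA : ('A':Char).val.toNat = 65 := by decide
      have hZ : ('Z':Char).val.toNat = 90 := by decide
      simp only [Char.le_def, UInt32.le_iff_toNat_le] at h1 h2
      simp only [Char.toNat]
      omega
    have hv : (c.toNat + 32).isValidChar := by
      left; simp only [Char.toNat] at hb ⊢; omega
    simp only [pvDomChar]
    rw [Char.toNat_ofNat, if_pos hv]
    simp only [Bool.or_eq_true, Bool.and_eq_true, decide_eq_true_eq, beq_iff_eq]
    left
    omega
  · rw [if_neg (by
      rcases Decidable.not_and_iff_or_not.mp h with h' | h' <;> simp [h'])]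
    exact hd

-- ===== VERDICT (by name: the statement is the Claim_ definition above) =====
theorem tokenize_name_spec : Claim_equal_tokenize_name := by
  intro name hdom
  unfold Spec_tokenize_name tokenize_name tokenize_name_alt
  have hlow : ∀ c ∈ (PySem.Str.lower name).toList, pvDomChar c = true := by
    intro c hcmem
    rw [PySem.Str.toList_lower] at hcmem
    rcases List.mem_map.mp hcmem with ⟨d, hd, rfl⟩
    exact pvLowerChDom d (by
      have := (List.all_eq_true.mp hdom) d hd
      simpa using this)
  rw [pvLoop]
  simp only [List.nil_append]
  unfold PySem.Str.split₀
  rw [show (String.ofList ((PySem.Str.lower name).toList.map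
        (fun ch => if pvTok ch then ch else ' '))).toList =
      (PySem.Str.lower name).toList.map (fun ch => if pvTok ch then ch else ' ') from by simp]
  unfold PySem.Chars.split₀
  rw [pvGoRuns _ hlow [] []]
  simp
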